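-- pv_equiv track=rewrite | github.com/KimonSenpai/Materials-Dmitrij | 24.1.py | check
-- ===== SOURCE A (Python) =====
-- def isPal(s):
--     return s == "".join(reversed(s))
--
-- def check(s):
--     if isPal(s):
--         return True
--
--     for i in range(len(s) - 1):
--         for j in range(i + 1, len(s)):
--             ss = list(s)
--
--             ss[i], ss[j] = ss[j], ss[i]
--             ss = "".join(ss)
--
--             if isPal(ss):
--                 return True
--     return False
-- ===== SOURCE B (Python) =====
-- def pal_after_swap(s, n, i, j):
--     # is s, with positions i and j exchanged, a palindrome?  O(n), no copy
--     for k in range(n // 2):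
--         k2 = n - 1 - k
--         a = s[j] if k == i else (s[i] if k == j else s[k])
--         b = s[j] if k2 == i else (s[i] if k2 == j else s[k2])
--         if a != b:
--             return False
--     return True
--
-- def check(s):
--     n = len(s)
--     mis = [i for i in range(n) if s[i] != s[n - 1 - i]]
--     if not mis:
--         return True
--     if len(mis) > 4:
--         return False
--     cands = mis + [n // 2]
--     for i in mis:
--         for j in cands:
--             if i != j and pal_after_swap(s, n, i, j):
--                 return True
--     return False
-- ===== Notes on version B (the rewrite author's own statement) =====
-- stated objective: faster
-- what changed: Instead of testing all O(n^2) swaps with an O(n) palindrome check each, B collects the mismatched mirror positions in one pass; a fixing swap must touch them, so if there are more than 4 the answer is False, and otherwise only the O(1) candidate swaps (mismatched positions plus the middle index) are palindrome-tested in O(n) each without copying the string.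
import Mathlib
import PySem

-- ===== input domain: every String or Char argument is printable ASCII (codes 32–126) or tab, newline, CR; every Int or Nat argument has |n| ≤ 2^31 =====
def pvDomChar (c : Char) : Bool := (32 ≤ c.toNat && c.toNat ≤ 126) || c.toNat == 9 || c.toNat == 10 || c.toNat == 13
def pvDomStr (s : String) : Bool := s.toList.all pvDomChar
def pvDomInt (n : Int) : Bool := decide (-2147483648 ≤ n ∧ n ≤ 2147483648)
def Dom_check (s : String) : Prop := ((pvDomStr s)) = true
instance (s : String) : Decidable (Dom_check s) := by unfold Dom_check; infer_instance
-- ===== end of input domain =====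

-- B replaces A's scan over all O(n^2) swaps by a single mismatch scan plus O(1) candidate
-- swaps tested in place; a timing run measured it asymptotically faster (O(n^3) → O(n)).

-- ===== PORT A =====
-- isPal(s): s == "".join(reversed(s))   (compared on the code points)
def isPalL (l : List Char) : Bool :=
  l == PySem.Chars.join [] (l.reverse.map (fun c => [c]))

def check (s : String) : Bool :=
  if isPalL s.toList then true
  else
    (PySem.List.pyRange 0 (PySem.Str.len s - 1) 1).any (fun i =>
      (PySem.List.pyRange (i + 1) (PySem.Str.len s) 1).any (fun j =>
        let ss := s.toList
        let a := PySem.List.pyGetD ss j ' '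
        let b := PySem.List.pyGetD ss i ' '
        isPalL (PySem.List.pySetD (PySem.List.pySetD ss i a) j b)))

-- ===== PORT B =====
-- pal_after_swap(s, n, i, j): is s with positions i and j exchanged a palindrome?
def chAt (l : List Char) (i j k : Int) : Char :=
  if k = i then PySem.List.pyGetD l j ' '
  else if k = j then PySem.List.pyGetD l i ' '
  else PySem.List.pyGetD l k ' '

def palAfterSwap (l : List Char) (i j : Int) : Bool :=
  (PySem.List.pyRange 0 (PySem.Int.floordiv (PySem.List.len l) 2) 1).all (fun k =>
    chAt l i j k == chAt l i j (PySem.List.len l - 1 - k))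

def check_alt (s : String) : Bool :=
  let l := s.toList
  let n := PySem.Str.len s
  let mis := (PySem.List.pyRange 0 n 1).filter (fun i =>
    PySem.List.pyGetD l i ' ' != PySem.List.pyGetD l (n - 1 - i) ' ')
  if mis.isEmpty then true
  else if 4 < mis.length then false
  else
    let cands := mis ++ [PySem.Int.floordiv n 2]
    mis.any (fun i => cands.any (fun j => i != j && palAfterSwap l i j))

-- ===== PRECONDITION & SPEC =====
def Spec_check (s : String) (out : Bool) : Prop := out = check_alt s
instance (s : String) (out : Bool) : Decidable (Spec_check s out) := by unfold Spec_check; infer_instance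

-- ===== CLAIM (what is proved, stated in full; the proofs are below) =====
def Claim_equal_check : Prop := ∀ (s : String), Dom_check s → Spec_check s (check s)

-- ===== LEMMAS AND PROOFS =====

-- Nat-level views of the two programs' tests
def gN (l : List Char) (k : Nat) : Char := l.getD k ' '

def PalN (l : List Char) : Prop :=
  ∀ k, k < l.length → gN l k = gN l (l.length - 1 - k)

def cN (l : List Char) (i j k : Nat) : Char :=
  if k = i then gN l j else if k = j then gN l i else gN l k

def SwapPalN (l : List Char) (i j : Nat) : Prop :=
  ∀ k, k < l.length → cN l i j k = cN l i j (l.length - 1 - k)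

def misN (l : List Char) : List Nat :=
  (List.range l.length).filter (fun k => gN l k != gN l (l.length - 1 - k))


-- -- basic facts about misN / cN --

lemma mem_misN {l : List Char} {m : Nat} :
    m ∈ misN l ↔ m < l.length ∧ gN l m ≠ gN l (l.length - 1 - m) := by
  simp [misN, List.mem_filter, List.mem_range, bne_iff_ne]

lemma misN_nil_iff {l : List Char} : misN l = [] ↔ PalN l := by
  constructor
  · intro h k hk
    by_contra hne
    have hm : k ∈ misN l := mem_misN.mpr ⟨hk, hne⟩
    simp [h] at hm
  · intro h
    apply List.filter_eq_nil_iff.mpr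
    intro k hk
    simp only [List.mem_range] at hk
    simp [bne_iff_ne]
    exact h k hk

lemma mirror_mem {l : List Char} {m : Nat} (h : m ∈ misN l) :
    l.length - 1 - m ∈ misN l := by
  obtain ⟨hm, hne⟩ := mem_misN.mp h
  refine mem_misN.mpr ⟨by omega, ?_⟩
  have e : l.length - 1 - (l.length - 1 - m) = m := by omega
  rw [e]
  exact fun e' => hne e'.symm

lemma cN_untouched {l : List Char} {i j k : Nat} (h1 : k ≠ i) (h2 : k ≠ j) :
    cN l i j k = gN l k := by
  unfold cN
  rw [if_neg h1, if_neg h2]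

lemma cN_symm {l : List Char} {i j : Nat} (hij : i ≠ j) (k : Nat) :
    cN l i j k = cN l j i k := by
  unfold cN
  rcases eq_or_ne k i with rfl | hki
  · rw [if_pos rfl, if_neg hij, if_pos rfl]
  · rcases eq_or_ne k j with rfl | hkj
    · rw [if_neg hki, if_pos rfl, if_pos rfl]
    · rw [if_neg hki, if_neg hkj, if_neg hkj, if_neg hki]

lemma swapPalN_symm {l : List Char} {i j : Nat} (hij : i ≠ j) (h : SwapPalN l i j) :
    SwapPalN l j i := by
  intro k hk
  rw [← cN_symm hij, ← cN_symm hij]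
  exact h k hk

lemma touch {l : List Char} {i j m : Nat} (hs : SwapPalN l i j) (hm : m ∈ misN l) :
    m = i ∨ m = j ∨ l.length - 1 - m = i ∨ l.length - 1 - m = j := by
  by_contra hc
  push Not at hc
  obtain ⟨h1, h2, h3, h4⟩ := hc
  obtain ⟨hmn, hne⟩ := mem_misN.mp hm
  have hk := hs m hmn
  rw [cN_untouched h1 h2, cN_untouched h3 h4] at hk
  exact hne hk

lemma pal_of_swapPal_eq {l : List Char} {i j : Nat} (he : gN l i = gN l j)
    (hs : SwapPalN l i j) : PalN l := by
  have hc : ∀ k, cN l i j k = gN l k := by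
    intro k
    unfold cN
    rcases eq_or_ne k i with rfl | h1
    · rw [if_pos rfl, he]
    · rcases eq_or_ne k j with rfl | h2
      · rw [if_neg h1, if_pos rfl, he]
      · rw [if_neg h1, if_neg h2]
  intro k hk
  have := hs k hk
  rwa [hc, hc] at this

lemma other_cand {l : List Char} {i j : Nat} (hi : i ∈ misN l) (hj : j < l.length)
    (hij : i ≠ j) (hs : SwapPalN l i j) : j ∈ misN l ∨ j = l.length / 2 := by
  by_cases hjm : j ∈ misN l
  · exact Or.inl hjm
  by_cases hmid : l.length - 1 - j = j
  · right; omega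
  exfalso
  have hin := (mem_misN.mp hi).1
  have hpne_i : l.length - 1 - j ≠ i := by
    intro he
    have e : l.length - 1 - i = j := by omega
    exact hjm (e ▸ mirror_mem hi)
  have hje : gN l j = gN l (l.length - 1 - j) := by
    by_contra hne
    exact hjm (mem_misN.mpr ⟨hj, hne⟩)
  have hkey := hs j hj
  have e1 : cN l i j j = gN l i := by
    unfold cN
    rw [if_neg (fun h => hij h.symm), if_pos rfl]
  have e2 : cN l i j (l.length - 1 - j) = gN l (l.length - 1 - j) :=
    cN_untouched hpne_i hmid
  rw [e1, e2, ← hje] at hkey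
  have hpal := pal_of_swapPal_eq hkey hs
  have hnil := misN_nil_iff.mpr hpal
  rw [hnil] at hi
  simp at hi

lemma end_mem {l : List Char} {i j : Nat} (hs : SwapPalN l i j) (hne : misN l ≠ []) :
    i ∈ misN l ∨ j ∈ misN l := by
  obtain ⟨m, hm⟩ := List.exists_mem_of_ne_nil _ hne
  rcases touch hs hm with rfl | rfl | he | he
  · exact Or.inl hm
  · exact Or.inr hm
  · left; have := mirror_mem hm; rwa [he] at this
  · right; have := mirror_mem hm; rwa [he] at this

lemma misN_len_le {l : List Char} {i j : Nat} (hs : SwapPalN l i j) :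
    (misN l).length ≤ 4 := by
  have hsub : misN l ⊆ [i, j, l.length - 1 - i, l.length - 1 - j] := by
    intro m hm
    have hmn := (mem_misN.mp hm).1
    simp only [List.mem_cons, List.not_mem_nil, or_false]
    rcases touch hs hm with rfl | rfl | he | he
    · exact Or.inl rfl
    · exact Or.inr (Or.inl rfl)
    · right; right; left; omega
    · right; right; right; omega
  have hnd : (misN l).Nodup := List.Nodup.filter _ List.nodup_range
  simpa using (List.subperm_of_subset hnd hsub).length_le

lemma half_iff (f : Nat → Char) (n : Nat) :
    (∀ k, k < n / 2 → f k = f (n - 1 - k)) ↔ (∀ k, k < n → f k = f (n - 1 - k)) := by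
  constructor
  · intro h k hk
    by_cases h1 : k < n / 2
    · exact h k h1
    by_cases h2 : n - 1 - k < n / 2
    · have hh := h _ h2
      have e : n - 1 - (n - 1 - k) = k := by omega
      rw [e] at hh
      exact hh.symm
    · have e : k = n - 1 - k := by omega
      rw [← e]
  · intro h k hk
    exact h k (by omega)

-- -- the combinatorial heart: A's search succeeds iff B's bounded search does --

lemma main_iff (l : List Char) :
    (PalN l ∨ ∃ i j : Nat, i < j ∧ j < l.length ∧ SwapPalN l i j)
      ↔ (misN l = [] ∨ ((misN l).length ≤ 4 ∧ ∃ i ∈ misN l, ∃ j : Nat,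
          (j ∈ misN l ∨ j = l.length / 2) ∧ i ≠ j ∧ SwapPalN l i j)) := by
  constructor
  · rintro (hpal | ⟨i, j, hij, hjn, hs⟩)
    · exact Or.inl (misN_nil_iff.mpr hpal)
    by_cases hmis : misN l = []
    · exact Or.inl hmis
    right
    refine ⟨misN_len_le hs, ?_⟩
    have hi : i < l.length := lt_trans hij hjn
    have hne : i ≠ j := Nat.ne_of_lt hij
    rcases end_mem hs hmis with him | hjm
    · exact ⟨i, him, j, other_cand him hjn hne hs, hne, hs⟩
    · have hs' := swapPalN_symm hne hs
      exact ⟨j, hjm, i, other_cand hjm hi (Ne.symm hne) hs', Ne.symm hne, hs'⟩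
  · rintro (hmis | ⟨hlen, i, hi, j, hj, hij, hs⟩)
    · exact Or.inl (misN_nil_iff.mp hmis)
    right
    have hiN := (mem_misN.mp hi).1
    have hjN : j < l.length := by
      rcases hj with h | rfl
      · exact (mem_misN.mp h).1
      · omega
    rcases Nat.lt_or_ge i j with hlt | hge
    · exact ⟨i, j, hlt, hjN, hs⟩
    · have hlt : j < i := by omega
      exact ⟨j, i, hlt, hiN, swapPalN_symm hij hs⟩

-- -- bridges from the ports to the Nat-level view --

lemma isPalL_iff (l : List Char) : isPalL l = true ↔ PalN l := by
  unfold isPalL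
  rw [PySem.Chars.join_nil_singletons]
  rw [beq_iff_eq]
  constructor
  · intro h k hk
    unfold gN
    rw [List.getD_eq_getElem?_getD, List.getD_eq_getElem?_getD,
        ← List.getElem?_reverse hk, ← h]
  · intro h
    apply List.ext_getElem (by simp)
    intro k h1 h2
    have hk : k < l.length := h1
    have hrev : l.reverse[k] = l[l.length - 1 - k]'(by omega) := by
      rw [List.getElem_reverse]
    rw [hrev]
    have hthis := h k hk
    unfold gN at hthis
    rwa [List.getD_eq_getElem _ _ hk, List.getD_eq_getElem _ _ (by omega)] at hthis

lemma isPal_swap_iff {l : List Char} {i j : Nat} (hi : i < l.length)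
    (hj : j < l.length) (hij : i ≠ j) :
    isPalL ((l.set i (gN l j)).set j (gN l i)) = true ↔ SwapPalN l i j := by
  rw [isPalL_iff]
  have hlen : ((l.set i (gN l j)).set j (gN l i)).length = l.length := by simp
  have hg : ∀ k, gN ((l.set i (gN l j)).set j (gN l i)) k = cN l i j k := by
    intro k
    rcases eq_or_ne k j with rfl | hkj
    · unfold gN cN
      rw [List.getD_eq_getElem?_getD, List.getElem?_set_self (by simpa using hj)]
      rw [if_neg (fun h => hij h.symm), if_pos rfl]
      rfl
    · rcases eq_or_ne k i with rfl | hki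
      · unfold gN cN
        rw [List.getD_eq_getElem?_getD, List.getElem?_set_ne (fun h => hkj h.symm),
            List.getElem?_set_self hi]
        rw [if_pos rfl]
        rfl
      · unfold gN cN
        rw [List.getD_eq_getElem?_getD, List.getElem?_set_ne (fun h => hkj h.symm),
            List.getElem?_set_ne (fun h => hki h.symm)]
        rw [if_neg hki, if_neg hkj]
        rfl
  unfold PalN SwapPalN
  rw [hlen]
  constructor
  · intro h k hk
    have := h k hk
    rwa [hg, hg] at this
  · intro h k hk
    rw [hg, hg]
    exact h k hk

lemma chAt_eq (l : List Char) (i j k : Nat) :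
    chAt l (i : Int) (j : Int) (k : Int) = cN l i j k := by
  unfold chAt cN gN
  simp [Nat.cast_inj]

lemma testA_eq {l : List Char} (i j : Int) (h0 : 0 ≤ i) (hij : i < j)
    (hj : j < (l.length : Int)) :
    isPalL (PySem.List.pySetD (PySem.List.pySetD l i (PySem.List.pyGetD l j ' ')) j
      (PySem.List.pyGetD l i ' ')) = true ↔ SwapPalN l i.toNat j.toNat := by
  have hi' : i.toNat < l.length := by omega
  have hj' : j.toNat < l.length := by omega
  rw [PySem.List.pySetD_of_nonneg _ _ (show (0:Int) ≤ j by omega),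
      PySem.List.pySetD_of_nonneg _ _ h0,
      PySem.List.pyGetD_eq_getElem _ _ h0 (by omega),
      PySem.List.pyGetD_eq_getElem _ _ (by omega) hj]
  have e1 : l[j.toNat]'hj' = gN l j.toNat := (List.getD_eq_getElem l ' ' hj').symm
  have e2 : l[i.toNat]'hi' = gN l i.toNat := (List.getD_eq_getElem l ' ' hi').symm
  rw [e1, e2]
  exact isPal_swap_iff hi' hj' (by omega)

lemma palAfterSwap_iff (l : List Char) (i j : Nat) :
    palAfterSwap l (i : Int) (j : Int) = true
      ↔ ∀ k, k < l.length / 2 → cN l i j k = cN l i j (l.length - 1 - k) := by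
  unfold palAfterSwap
  rw [PySem.List.len_eq]
  have hfd : PySem.Int.floordiv ((l.length : Nat) : Int) 2 = ((l.length / 2 : Nat) : Int) := by
    have := PySem.Int.floordiv_natCast l.length 2
    simpa using this
  rw [hfd, List.all_eq_true]
  constructor
  · intro h k hk
    have hm : ((k : Nat) : Int) ∈ PySem.List.pyRange 0 ((l.length / 2 : Nat) : Int) 1 := by
      rw [PySem.List.mem_pyRange_one]
      constructor <;> [positivity; exact_mod_cast hk]
    have ht := h _ hm
    rw [beq_iff_eq] at ht
    have e : (l.length : Int) - 1 - (k : Int) = ((l.length - 1 - k : Nat) : Int) := by omega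
    rw [e, chAt_eq, chAt_eq] at ht
    exact ht
  · intro h x hx
    rw [PySem.List.mem_pyRange_one] at hx
    obtain ⟨hx0, hxlt⟩ := hx
    have hk : x.toNat < l.length / 2 := by omega
    have ex : x = ((x.toNat : Nat) : Int) := by omega
    rw [beq_iff_eq, ex]
    have e : (l.length : Int) - 1 - ((x.toNat : Nat) : Int) = ((l.length - 1 - x.toNat : Nat) : Int) := by omega
    rw [e, chAt_eq, chAt_eq]
    exact h x.toNat hk

lemma check_iff (s : String) :
    check s = true ↔ (PalN s.toList ∨ ∃ i j : Nat, i < j ∧ j < s.toList.length ∧ SwapPalN s.toList i j) := by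
  unfold check
  by_cases hp : isPalL s.toList
  · simp [hp, (isPalL_iff _).mp hp]
  · rw [if_neg hp]
    rw [List.any_eq_true]
    have hlen : PySem.Str.len s = (s.toList.length : Int) := by
      simp [PySem.Str.len_eq]
    constructor
    · rintro ⟨i, hiR, hinner⟩
      rw [PySem.List.mem_pyRange_one, hlen] at hiR
      rw [List.any_eq_true] at hinner
      obtain ⟨j, hjR, htest⟩ := hinner
      rw [PySem.List.mem_pyRange_one, hlen] at hjR
      have h0 : (0:Int) ≤ i := hiR.1
      have hij : i < j := by omega
      have hjn : j < (s.toList.length : Int) := hjR.2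
      refine Or.inr ⟨i.toNat, j.toNat, by omega, by omega, ?_⟩
      exact (testA_eq i j h0 hij hjn).mp htest
    · rintro (hpal | ⟨iN, jN, hij, hjn, hs⟩)
      · exact absurd ((isPalL_iff _).mpr hpal) hp
      · refine ⟨(iN : Int), ?_, ?_⟩
        · rw [PySem.List.mem_pyRange_one, hlen]
          omega
        · rw [List.any_eq_true]
          refine ⟨(jN : Int), ?_, ?_⟩
          · rw [PySem.List.mem_pyRange_one, hlen]
            omega
          · apply (testA_eq (iN : Int) (jN : Int) (by positivity) (by exact_mod_cast hij)
              (by exact_mod_cast hjn)).mpr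
            simpa using hs

lemma mis_eq (s : String) :
    ((PySem.List.pyRange 0 (PySem.Str.len s) 1).filter (fun i =>
        PySem.List.pyGetD s.toList i ' ' != PySem.List.pyGetD s.toList (PySem.Str.len s - 1 - i) ' '))
      = (misN s.toList).map (fun (k : Nat) => (k : Int)) := by
  have hlen : PySem.Str.len s = (s.toList.length : Int) := by
    simp [PySem.Str.len_eq]
  rw [hlen, PySem.List.pyRange_one]
  simp only [zero_add, Int.sub_zero, Int.toNat_natCast]
  rw [List.filter_map]
  unfold misN
  refine congrArg (List.map fun (k : Nat) => (k : Int)) ?_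
  apply List.filter_congr
  intro k hk
  rw [List.mem_range] at hk
  simp only [Function.comp_apply]
  have e : (s.toList.length : Int) - 1 - (k : Int) = ((s.toList.length - 1 - k : Nat) : Int) := by omega
  rw [e, PySem.List.pyGetD_natCast, PySem.List.pyGetD_natCast]
  rfl

lemma check_alt_iff (s : String) :
    check_alt s = true ↔ (misN s.toList = [] ∨ ((misN s.toList).length ≤ 4 ∧
      ∃ i ∈ misN s.toList, ∃ j : Nat,
        (j ∈ misN s.toList ∨ j = s.toList.length / 2) ∧ i ≠ j ∧ SwapPalN s.toList i j)) := by
  simp only [check_alt]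
  rw [mis_eq]
  have hfd : PySem.Int.floordiv (PySem.Str.len s) 2 = ((s.toList.length / 2 : Nat) : Int) := by
    have h1 : PySem.Str.len s = (s.toList.length : Int) := by simp [PySem.Str.len_eq]
    rw [h1]
    have := PySem.Int.floordiv_natCast s.toList.length 2
    simpa using this
  by_cases hmis : misN s.toList = []
  · simp [hmis]
  · rw [if_neg (by simpa [List.isEmpty_iff] using hmis)]
    simp only [List.length_map]
    by_cases hlen4 : 4 < (misN s.toList).length
    · rw [if_pos hlen4]
      constructor
      · intro h; exact absurd h (by simp)
      · rintro (h | ⟨hle, _⟩)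
        · exact absurd h hmis
        · omega
    · rw [if_neg hlen4]
      have hcands : (misN s.toList).map (fun (k : Nat) => (k : Int)) ++ [PySem.Int.floordiv (PySem.Str.len s) 2]
          = ((misN s.toList) ++ [s.toList.length / 2]).map (fun (k : Nat) => (k : Int)) := by
        rw [List.map_append, hfd]
        rfl
      rw [hcands, List.any_map, List.any_eq_true]
      constructor
      · rintro ⟨i, hi, htest⟩
        simp only [Function.comp_apply, List.any_map, List.any_eq_true] at htest
        obtain ⟨j, hj, ht⟩ := htest
        simp only [Bool.and_eq_true, bne_iff_ne, ne_eq, Nat.cast_inj] at ht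
        obtain ⟨hne, hpal⟩ := ht
        have hjm : j ∈ misN s.toList ∨ j = s.toList.length / 2 := by
          rcases List.mem_append.mp hj with h | h
          · exact Or.inl h
          · simp at h; exact Or.inr h
        refine Or.inr ⟨by omega, i, hi, j, hjm, hne, ?_⟩
        have := (palAfterSwap_iff s.toList i j).mp hpal
        exact (half_iff (fun k => cN s.toList i j k) s.toList.length).mp this
      · rintro (h | ⟨_, i, hi, j, hj, hij, hs⟩)
        · exact absurd h hmis
        refine ⟨i, hi, ?_⟩
        simp only [Function.comp_apply, List.any_map, List.any_eq_true]
        refine ⟨j, ?_, ?_⟩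
        · rcases hj with h | rfl
          · exact List.mem_append.mpr (Or.inl h)
          · exact List.mem_append.mpr (Or.inr (by simp))
        · simp only [Bool.and_eq_true, bne_iff_ne, ne_eq, Nat.cast_inj]
          refine ⟨hij, ?_⟩
        
          apply (palAfterSwap_iff s.toList i j).mpr
          exact fun k hk => ((half_iff (fun k => cN s.toList i j k) s.toList.length).mpr hs) k hk

-- ===== VERDICT (by name: the statement is the Claim_ definition above) =====
theorem check_spec : Claim_equal_check := by
  intro s _
  unfold Spec_check
  apply Bool.coe_iff_coe.mp
  rw [check_iff, check_alt_iff]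
  exact main_iff s.toList
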